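-- pv_equiv track=rewrite | github.com/22aiml031/Strength_Robotics | Task_1_rag/app.py | expand_question_for_retrieval
-- ===== SOURCE A (Python) =====
-- def expand_question_for_retrieval(question: str) -> str:
--     """Expand query with domain-specific keywords for better retrieval."""
--     lower = question.lower()
--
--     if any(kw in lower for kw in [
--         "tracker", "tracking", "mediaflow", "kcf", "dlib",
--         "best tracker", "failure rate", "jitter"
--     ]):
--         return (
--             question
--             + " MedianFlow KCF Dlib tracker performance failure rate "
--             + "jitter stable robust accurate barbell trajectory score match "
--             + "tracking failures robustness analysis table"
--         )
--
--     if any(kw in lower for kw in [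
--         "kinematic", "injury", "ydrop", "ymax", "x1", "xnet",
--         "variable", "matter", "risk"
--     ]):
--         return (
--             question
--             + " Ydrop Ymax X1 Xnet kinematic variables injury risk "
--             + "bar drop catch phase horizontal displacement joint loading "
--             + "performance score biomechanical"
--         )
--
--     if any(kw in lower for kw in [
--         "imputation", "missing", "handle", "how does", "method",
--         "pipeline", "approach"
--     ]):
--         return (
--             question
--             + " feature importance factor analysis clustering XGBoost "
--             + "softmax similarity score imputed value weighted average "
--             + "missing value imputation pipeline steps"
--         )
--
--     if any(kw in lower for kw in [
--         "problem", "solve", "objective", "goal", "purpose",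
--         "rsimod", "what is", "about"
--     ]):
--         return (
--             question
--             + " missing data challenge cohort studies proposed methodology "
--             + "achieved reduction MSE increase R2 RSImod athletic readiness "
--             + "novel imputation technique"
--         )
--
--     return question
-- ===== SOURCE B (Python) =====
-- # Different algorithm: flatten all keywords into one (keyword, group-index) list and
-- # make a SINGLE accumulator pass computing the MINIMUM group index among all matched
-- # keywords (no per-group check-then-return); the suffix is then looked up by index.
-- # Correct because A returns the suffix of the FIRST matching group, which is exactly
-- # the group with the minimal index among those that match.
--
-- _GROUPS = [
--     ["tracker", "tracking", "mediaflow", "kcf", "dlib",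
--      "best tracker", "failure rate", "jitter"],
--     ["kinematic", "injury", "ydrop", "ymax", "x1", "xnet",
--      "variable", "matter", "risk"],
--     ["imputation", "missing", "handle", "how does", "method",
--      "pipeline", "approach"],
--     ["problem", "solve", "objective", "goal", "purpose",
--      "rsimod", "what is", "about"],
-- ]
--
-- _SUFFIXES = [
--     " MedianFlow KCF Dlib tracker performance failure rate "
--     "jitter stable robust accurate barbell trajectory score match "
--     "tracking failures robustness analysis table",
--     " Ydrop Ymax X1 Xnet kinematic variables injury risk "
--     "bar drop catch phase horizontal displacement joint loading "
--     "performance score biomechanical",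
--     " feature importance factor analysis clustering XGBoost "
--     "softmax similarity score imputed value weighted average "
--     "missing value imputation pipeline steps",
--     " missing data challenge cohort studies proposed methodology "
--     "achieved reduction MSE increase R2 RSImod athletic readiness "
--     "novel imputation technique",
--     "",
-- ]
--
-- _TAGGED = [(kw, g) for g, kws in enumerate(_GROUPS) for kw in kws]
--
-- def expand_question_for_retrieval(question: str) -> str:
--     lower = question.lower()
--     best = 4
--     for kw, g in _TAGGED:
--         if kw in lower:
--             best = min(best, g)
--     return question + _SUFFIXES[best]
-- ===== Notes on version B (the rewrite author's own statement) =====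
-- stated objective: alternative
-- what changed: Instead of four check-then-return group blocks, B flattens all keywords into one (keyword, group-index) list and makes a single accumulator pass computing the minimum matched group index, then indexes a suffix table (empty suffix at index 4).
import Mathlib
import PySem

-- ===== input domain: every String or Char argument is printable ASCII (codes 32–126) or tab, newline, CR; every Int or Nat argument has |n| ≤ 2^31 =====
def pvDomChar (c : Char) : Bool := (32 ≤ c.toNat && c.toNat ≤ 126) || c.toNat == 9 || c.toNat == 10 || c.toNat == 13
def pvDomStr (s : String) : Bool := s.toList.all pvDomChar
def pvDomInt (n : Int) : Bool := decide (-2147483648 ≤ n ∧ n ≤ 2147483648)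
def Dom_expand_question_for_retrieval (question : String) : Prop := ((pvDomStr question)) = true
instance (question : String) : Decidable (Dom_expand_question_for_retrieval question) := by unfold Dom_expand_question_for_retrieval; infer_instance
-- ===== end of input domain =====

-- B replaces A's four check-then-return keyword blocks by one flat pass over tagged
-- keywords computing the minimum matched group index, then a suffix-table lookup;
-- objective: alternative (same cost, different algorithm/data structure).

-- ===== PORT A =====
def expand_question_for_retrieval (question : String) : String :=
  let lower := PySem.Str.lower question
  if ["tracker", "tracking", "mediaflow", "kcf", "dlib",
      "best tracker", "failure rate", "jitter"].any
      (fun kw => PySem.Str.isIn kw lower) then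
    question
      ++ " MedianFlow KCF Dlib tracker performance failure rate "
      ++ "jitter stable robust accurate barbell trajectory score match "
      ++ "tracking failures robustness analysis table"
  else if ["kinematic", "injury", "ydrop", "ymax", "x1", "xnet",
           "variable", "matter", "risk"].any
      (fun kw => PySem.Str.isIn kw lower) then
    question
      ++ " Ydrop Ymax X1 Xnet kinematic variables injury risk "
      ++ "bar drop catch phase horizontal displacement joint loading "
      ++ "performance score biomechanical"
  else if ["imputation", "missing", "handle", "how does", "method",
           "pipeline", "approach"].any
      (fun kw => PySem.Str.isIn kw lower) then
    question
      ++ " feature importance factor analysis clustering XGBoost "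
      ++ "softmax similarity score imputed value weighted average "
      ++ "missing value imputation pipeline steps"
  else if ["problem", "solve", "objective", "goal", "purpose",
           "rsimod", "what is", "about"].any
      (fun kw => PySem.Str.isIn kw lower) then
    question
      ++ " missing data challenge cohort studies proposed methodology "
      ++ "achieved reduction MSE increase R2 RSImod athletic readiness "
      ++ "novel imputation technique"
  else
    question

-- ===== PORT B =====
def pvGroups : List (List String) :=
  [ ["tracker", "tracking", "mediaflow", "kcf", "dlib",
     "best tracker", "failure rate", "jitter"],
    ["kinematic", "injury", "ydrop", "ymax", "x1", "xnet",
     "variable", "matter", "risk"],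
    ["imputation", "missing", "handle", "how does", "method",
     "pipeline", "approach"],
    ["problem", "solve", "objective", "goal", "purpose",
     "rsimod", "what is", "about"] ]

def pvSuffixes : List String :=
  [ " MedianFlow KCF Dlib tracker performance failure rate "
      ++ "jitter stable robust accurate barbell trajectory score match "
      ++ "tracking failures robustness analysis table",
    " Ydrop Ymax X1 Xnet kinematic variables injury risk "
      ++ "bar drop catch phase horizontal displacement joint loading "
      ++ "performance score biomechanical",
    " feature importance factor analysis clustering XGBoost "
      ++ "softmax similarity score imputed value weighted average "
      ++ "missing value imputation pipeline steps",
    " missing data challenge cohort studies proposed methodology "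
      ++ "achieved reduction MSE increase R2 RSImod athletic readiness "
      ++ "novel imputation technique",
    "" ]

-- flat [(kw, g) for g, kws in enumerate(_GROUPS) for kw in kws]
def pvTagged : List (String × Nat) :=
  pvGroups.zipIdx.flatMap (fun p => p.1.map (fun kw => (kw, p.2)))

def expand_question_for_retrieval_alt (question : String) : String :=
  let lower := PySem.Str.lower question
  let best := pvTagged.foldl
    (fun acc p => if PySem.Str.isIn p.1 lower then min acc p.2 else acc) 4
  question ++ pvSuffixes.getD best ""

-- ===== PRECONDITION & SPEC =====
def Spec_expand_question_for_retrieval (question : String) (out : String) : Prop := out = expand_question_for_retrieval_alt question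
instance (question : String) (out : String) : Decidable (Spec_expand_question_for_retrieval question out) := by unfold Spec_expand_question_for_retrieval; infer_instance

-- ===== CLAIM (what is proved, stated in full; the proofs are below) =====
def Claim_equal_expand_question_for_retrieval : Prop := ∀ (question : String), Dom_expand_question_for_retrieval question → Spec_expand_question_for_retrieval question (expand_question_for_retrieval question)

-- ===== LEMMAS AND PROOFS =====

-- folding the tagged keywords of ONE group (constant tag i) updates the running
-- minimum with i exactly when some keyword of the group occurs in `lower`
theorem pv_foldl_min_tag (l : List String) (g : String × Nat → Bool) (i : Nat) (acc : Nat) :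
    (l.map (fun kw => (kw, i))).foldl
      (fun a p => if g p then min a p.2 else a) acc
      = if l.any (fun kw => g (kw, i)) then min acc i else acc := by
  induction l generalizing acc with
  | nil => simp
  | cons h t ih =>
    by_cases hc : g (h, i) = true
    · simp [hc, ih]
    · simp [hc, ih]

-- ===== VERDICT (by name: the statement is the Claim_ definition above) =====
theorem expand_question_for_retrieval_spec : Claim_equal_expand_question_for_retrieval := by
  intro q _
  unfold Spec_expand_question_for_retrieval expand_question_for_retrieval
    expand_question_for_retrieval_alt
  have ht : pvTagged
      = (["tracker", "tracking", "mediaflow", "kcf", "dlib",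
          "best tracker", "failure rate", "jitter"].map (fun kw => (kw, (0 : Nat))))
        ++ (["kinematic", "injury", "ydrop", "ymax", "x1", "xnet",
          "variable", "matter", "risk"].map (fun kw => (kw, 1)))
        ++ (["imputation", "missing", "handle", "how does", "method",
          "pipeline", "approach"].map (fun kw => (kw, 2)))
        ++ (["problem", "solve", "objective", "goal", "purpose",
          "rsimod", "what is", "about"].map (fun kw => (kw, 3))) := by rfl
  rw [ht]
  simp only [List.foldl_append, pv_foldl_min_tag]
  split_ifs <;> simp_all [pvSuffixes, String.append_assoc]
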